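-- pv_equiv track=rewrite | github.com/Somi-Project/Somi | handlers/memory/injection.py | build_profile_block
-- ===== SOURCE A (Python) =====
-- from typing import Dict, List
--
-- def _trim_lines(lines: List[str], limit: int) -> List[str]:
--     out = []
--     for ln in lines:
--         ln2 = (ln or "").strip()
--         if not ln2:
--             continue
--         out.append(ln2)
--         if len(out) >= limit:
--             break
--     return out
--
-- def build_profile_block(rows: List[Dict]) -> str:
--     lines = []
--     for r in rows:
--         k = str(r.get("mkey") or r.get("slot_key") or "fact").replace("_", " ").title()
--         v = str(r.get("value") or r.get("text") or "").strip()
--         if v: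
--             lines.append(f"- {k}: {v}")
--     lines = _trim_lines(lines, 4)
--     return "[Profile]\n" + ("\n".join(lines) if lines else "- (none)")
-- ===== SOURCE B (Python) =====
-- def build_profile_block(rows):
--     lines = []
--     for r in rows:
--         k = str(r.get("mkey") or r.get("slot_key") or "fact").replace("_", " ").title()
--         v = str(r.get("value") or r.get("text") or "").strip()
--         if v:
--             lines.append(f"- {k}: {v}")
--             if len(lines) >= 4:
--                 break
--     return "[Profile]\n" + ("\n".join(lines) if lines else "- (none)")
-- ===== Notes on version B (the rewrite author's own statement) =====
-- stated objective: alternative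
-- what changed: Replaces A's two sequential passes (build the full line list, then re-strip/filter/cap it with the _trim_lines helper) by a single early-terminating loop that appends each line directly and breaks as soon as 4 lines are collected; the helper is dropped.
import Mathlib
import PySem

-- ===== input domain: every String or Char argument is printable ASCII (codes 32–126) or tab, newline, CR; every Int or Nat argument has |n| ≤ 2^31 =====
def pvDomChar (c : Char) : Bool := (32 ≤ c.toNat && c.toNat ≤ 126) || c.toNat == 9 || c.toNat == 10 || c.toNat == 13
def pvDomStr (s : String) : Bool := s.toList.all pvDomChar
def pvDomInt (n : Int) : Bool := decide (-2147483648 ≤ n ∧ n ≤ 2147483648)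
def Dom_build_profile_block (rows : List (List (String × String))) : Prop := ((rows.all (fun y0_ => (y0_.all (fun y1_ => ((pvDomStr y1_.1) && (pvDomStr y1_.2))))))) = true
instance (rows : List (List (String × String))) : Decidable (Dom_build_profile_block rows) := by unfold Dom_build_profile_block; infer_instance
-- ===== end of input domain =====

-- B replaces A's build-all-then-_trim_lines two-pass structure by a single early-terminating
-- pass that appends trimmed lines directly and breaks at 4 lines (objective: alternative decomposition).

-- ===== PORT A =====
-- shared helper: Python str.title() on the ASCII domain (uppercase a letter after a
-- non-letter, lowercase a letter after a letter); hand-ported, exact on ASCII input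
def pvTitle : List Char → Bool → List Char
  | [], _ => []
  | c :: cs, prev =>
    (if PySem.Chars.isalpha c then
        (if prev then PySem.Chars.lowerChar c else PySem.Chars.upperChar c)
      else c) :: pvTitle cs (PySem.Chars.isalpha c)

-- Python `x or y` for x an Optional[str]: y when x is None or "" (str() of a str is itself)
def pvOrStr (o : Option String) (d : String) : String :=
  match o with
  | some s => if s = "" then d else s
  | none => d

-- the k and v both Pythons compute for one row (as char lists)
def pvKV (r : List (String × String)) : List Char × List Char :=
  let k := pvTitle (PySem.Chars.replace
      (pvOrStr ((PySem.Dict.mk r).get? "mkey") (pvOrStr ((PySem.Dict.mk r).get? "slot_key") "fact")).toList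
      ['_'] [' ']) false
  let v := PySem.Chars.strip (pvOrStr ((PySem.Dict.mk r).get? "value") (pvOrStr ((PySem.Dict.mk r).get? "text") "")).toList
  (k, v)

-- f"- {k}: {v}"
def pvLine (k v : List Char) : List Char := '-' :: ' ' :: (k ++ ':' :: ' ' :: v)

-- _trim_lines, literal: for-loop with accumulator `out` and break at `limit`
def pvTrimGo (ls : List (List Char)) (limit : Nat) (out : List (List Char)) : List (List Char) :=
  match ls with
  | [] => out
  | ln :: rest =>
    let ln2 := PySem.Chars.strip (if ln = [] then [] else ln)   -- (ln or "").strip()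
    if ln2 = [] then pvTrimGo rest limit out
    else
      let out' := out ++ [ln2]
      if limit ≤ out'.length then out' else pvTrimGo rest limit out'

def build_profile_block (rows : List (List (String × String))) : String :=
  let lines := rows.foldl (fun acc r =>
    let kv := pvKV r
    if kv.2 = [] then acc else acc ++ [pvLine kv.1 kv.2]) []
  let lines2 := pvTrimGo lines 4 []
  String.ofList ("[Profile]\n".toList ++ (if lines2 = [] then "- (none)".toList else PySem.Chars.join ['\n'] lines2))

-- ===== PORT B =====
-- single pass: append the line if v is non-empty, break as soon as 4 lines are collected
def pvLoopB (rows : List (List (String × String))) (acc : List (List Char)) : List (List Char) :=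
  match rows with
  | [] => acc
  | r :: rs =>
    let kv := pvKV r
    if kv.2 = [] then pvLoopB rs acc
    else
      let acc' := acc ++ [pvLine kv.1 kv.2]
      if 4 ≤ acc'.length then acc' else pvLoopB rs acc'

def build_profile_block_alt (rows : List (List (String × String))) : String :=
  let lines := pvLoopB rows []
  String.ofList ("[Profile]\n".toList ++ (if lines = [] then "- (none)".toList else PySem.Chars.join ['\n'] lines))

-- ===== PRECONDITION & SPEC =====
def Spec_build_profile_block (rows : List (List (String × String))) (out : String) : Prop := out = build_profile_block_alt rows
instance (rows : List (List (String × String))) (out : String) : Decidable (Spec_build_profile_block rows out) := by unfold Spec_build_profile_block; infer_instance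

-- ===== CLAIM (what is proved, stated in full; the proofs are below) =====
def Claim_equal_build_profile_block : Prop := ∀ (rows : List (List (String × String))), Dom_build_profile_block rows → Spec_build_profile_block rows (build_profile_block rows)

-- ===== LEMMAS AND PROOFS =====

def pvP (r : List (String × String)) : Bool := (pvKV r).2 ≠ []
def pvF (r : List (String × String)) : List Char := pvLine (pvKV r).1 (pvKV r).2

theorem pv_foldl_eq (rows : List (List (String × String))) (acc : List (List Char)) :
    rows.foldl (fun acc r =>
      if (pvKV r).2 = [] then acc else acc ++ [pvLine (pvKV r).1 (pvKV r).2]) acc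
    = acc ++ (rows.filter pvP).map pvF := by
  induction rows generalizing acc with
  | nil => simp
  | cons r rs ih =>
    simp only [List.foldl_cons, List.filter_cons]
    by_cases h : (pvKV r).2 = []
    · simp [h, pvP, ih]
    · simp [h, pvP, pvF, ih]

theorem pv_dropWhile_idem (p : Char → Bool) (l : List Char) :
    List.dropWhile p (List.dropWhile p l) = List.dropWhile p l := by
  induction l with
  | nil => simp
  | cons a l ih => by_cases h : p a <;> simp [h, ih]

theorem pv_rstrip_rstrip (l : List Char) :
    PySem.Chars.rstrip (PySem.Chars.rstrip l) = PySem.Chars.rstrip l := by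
  simp [PySem.Chars.rstrip, pv_dropWhile_idem]

theorem pv_rstrip_append (xs v : List Char) (hv : v ≠ [])
    (h : PySem.Chars.rstrip v = v) :
    PySem.Chars.rstrip (xs ++ v) = xs ++ v := by
  have hrev : List.dropWhile PySem.Chars.isspace v.reverse = v.reverse := by
    have := congrArg List.reverse h
    simpa [PySem.Chars.rstrip] using this
  obtain ⟨c, t, hct⟩ : ∃ c t, v.reverse = c :: t := by
    cases hvr : v.reverse with
    | nil => exact absurd (by simpa using congrArg List.reverse hvr) hv
    | cons c t => exact ⟨c, t, rfl⟩
  have hc : PySem.Chars.isspace c = false := by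
    rw [hct] at hrev
    by_contra hcc
    have hcc' : PySem.Chars.isspace c = true := by
      cases hb : PySem.Chars.isspace c with
      | false => exact absurd hb hcc
      | true => rfl
    rw [List.dropWhile_cons_of_pos hcc'] at hrev
    have := congrArg List.length hrev
    have hle := List.length_dropWhile_le PySem.Chars.isspace t
    simp at this
    omega
  have hsplit : (xs ++ v).reverse = c :: (t ++ xs.reverse) := by simp [hct]
  have h2 : v = (c :: t).reverse := by rw [← hct]; simp
  simp only [PySem.Chars.rstrip, hsplit, List.dropWhile_cons, hc]
  rw [h2]
  simp

theorem pv_line_ok (r : List (String × String)) (h : (pvKV r).2 ≠ []) :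
    PySem.Chars.strip (pvF r) = pvF r ∧ pvF r ≠ [] := by
  constructor
  · have hv : PySem.Chars.rstrip (pvKV r).2 = (pvKV r).2 := by
      have hkv : (pvKV r).2 = PySem.Chars.strip
          (pvOrStr ((PySem.Dict.mk r).get? "value") (pvOrStr ((PySem.Dict.mk r).get? "text") "")).toList := rfl
      rw [hkv, PySem.Chars.strip, pv_rstrip_rstrip]
    show PySem.Chars.strip (pvLine (pvKV r).1 (pvKV r).2) = pvLine (pvKV r).1 (pvKV r).2
    simp only [pvLine, PySem.Chars.strip]
    have h1 : PySem.Chars.lstrip ('-' :: ' ' :: ((pvKV r).1 ++ ':' :: ' ' :: (pvKV r).2))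
        = '-' :: ' ' :: ((pvKV r).1 ++ ':' :: ' ' :: (pvKV r).2) := by
      simp [PySem.Chars.lstrip,
        show PySem.Chars.isspace '-' = false from by decide]
    rw [h1]
    have h2 : '-' :: ' ' :: ((pvKV r).1 ++ ':' :: ' ' :: (pvKV r).2)
        = ('-' :: ' ' :: ((pvKV r).1 ++ [':', ' '])) ++ (pvKV r).2 := by simp
    rw [h2, pv_rstrip_append _ _ h hv, ← h2]
  · simp [pvF, pvLine]

theorem pv_trim_take (ls : List (List Char)) (out : List (List Char))
    (hls : ∀ l ∈ ls, PySem.Chars.strip l = l ∧ l ≠ []) (hout : out.length < 4) :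
    pvTrimGo ls 4 out = out ++ ls.take (4 - out.length) := by
  induction ls generalizing out with
  | nil => simp [pvTrimGo]
  | cons ln rest ih =>
    obtain ⟨hs, hne⟩ := hls ln (List.mem_cons_self ..)
    have hrest : ∀ l ∈ rest, PySem.Chars.strip l = l ∧ l ≠ [] :=
      fun l hl => hls l (List.mem_cons_of_mem _ hl)
    simp only [pvTrimGo, if_neg hne, hs]
    by_cases hfull : 4 ≤ (out ++ [ln]).length
    · rw [if_pos hfull]
      have h1 : 4 - out.length = 1 := by simp at hfull; omega
      simp [h1]
    · rw [if_neg hfull]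
      rw [ih _ hrest (by simp at hfull ⊢; omega)]
      have h1 : 4 - out.length = (4 - (out ++ [ln]).length) + 1 := by
        simp at hfull ⊢; omega
      simp only [h1, List.take_succ_cons]
      simp

theorem pv_loopB_take (rows : List (List (String × String))) (acc : List (List Char))
    (hacc : acc.length < 4) :
    pvLoopB rows acc = acc ++ ((rows.filter pvP).map pvF).take (4 - acc.length) := by
  induction rows generalizing acc with
  | nil => simp [pvLoopB]
  | cons r rs ih =>
    simp only [pvLoopB, List.filter_cons]
    by_cases h : (pvKV r).2 = []
    · rw [if_pos h, ih _ hacc]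
      have hp : pvP r = false := by simp [pvP, h]
      simp [hp]
    · rw [if_neg h]
      have hp : pvP r = true := by simp [pvP, h]
      by_cases hfull : 4 ≤ (acc ++ [pvLine (pvKV r).1 (pvKV r).2]).length
      · rw [if_pos hfull]
        have h1 : 4 - acc.length = 1 := by simp at hfull; omega
        simp [hp, h1, pvF]
      · rw [if_neg hfull]
        rw [ih _ (by simp at hfull ⊢; omega)]
        have h1 : 4 - acc.length = (4 - (acc ++ [pvLine (pvKV r).1 (pvKV r).2]).length) + 1 := by
          simp at hfull ⊢; omega
        simp [hp, h1, List.take_succ_cons, pvF]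

-- ===== VERDICT (by name: the statement is the Claim_ definition above) =====
theorem build_profile_block_spec : Claim_equal_build_profile_block := by
  intro rows _
  show build_profile_block rows = build_profile_block_alt rows
  have hmem : ∀ l ∈ (rows.filter pvP).map pvF, PySem.Chars.strip l = l ∧ l ≠ [] := by
    intro l hl
    simp only [List.mem_map, List.mem_filter] at hl
    obtain ⟨r, ⟨_, hp⟩, rfl⟩ := hl
    exact pv_line_ok r (by simpa [pvP] using hp)
  simp only [build_profile_block, build_profile_block_alt]
  rw [pv_foldl_eq rows [], pv_loopB_take rows [] (by simp), List.nil_append,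
    pv_trim_take _ [] hmem (by simp)]
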